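-- pv_equiv track=rewrite | github.com/Madhuri97/CP-Problems | 09-shortenlongruns-Python/shortenlongruns.py | shortenlongruns
-- ===== SOURCE A (Python) =====
-- def shortenlongruns(L, k):
-- 	# Your code goes here
-- 	n = 0
-- 	l = []
-- 	for i in range(len(L)): #5
-- 		if L[i] not in l:   #2-T
-- 			l.append(L[i])  #l = [2,3,5]
-- 			n = 1
-- 		elif L[i] == L[i-1]: #5=5-T T
-- 			n +=1             #2
-- 			if n >= k:		  #2>=2T T
-- 				continue
-- 			else:
-- 				l.append(L[i])
-- 		elif L[i] != L[i - 1]: #T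
-- 			l.append(L[i])	   #[2,3,5,3]
-- 			n = 1
-- 	return l
-- ===== SOURCE B (Python) =====
-- def shortenlongruns(L, k):
--     # Stage 1: run-length encode L into maximal runs.
--     runs = []
--     for x in L:
--         if runs and runs[-1][0] == x:
--             runs[-1][1] += 1
--         else:
--             runs.append([x, 1])
--     # Stage 2: emit each run truncated to max(1, min(m, k-1)) copies.
--     out = []
--     for x, m in runs:
--         out.extend([x] * max(1, min(m, k - 1)))
--     return out
-- ===== Notes on version B (the rewrite author's own statement) =====
-- stated objective: faster
-- what changed: B is a two-stage algorithm: it first run-length encodes L into maximal (value, count) runs, then expands each run into max(1, min(count, k-1)) copies; A's single pass with a membership scan over the growing output and a run counter disappears entirely.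
import Mathlib
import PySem

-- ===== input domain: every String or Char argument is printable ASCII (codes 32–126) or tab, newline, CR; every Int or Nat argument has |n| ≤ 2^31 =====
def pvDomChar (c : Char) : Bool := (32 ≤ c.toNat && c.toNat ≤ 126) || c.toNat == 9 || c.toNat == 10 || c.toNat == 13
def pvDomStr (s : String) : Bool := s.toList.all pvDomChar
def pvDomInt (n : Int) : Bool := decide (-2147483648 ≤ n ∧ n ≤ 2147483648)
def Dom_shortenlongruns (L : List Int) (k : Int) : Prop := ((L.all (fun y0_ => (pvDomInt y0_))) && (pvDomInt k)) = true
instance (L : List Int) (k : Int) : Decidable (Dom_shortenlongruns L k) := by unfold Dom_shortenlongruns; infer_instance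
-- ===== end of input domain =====

-- B run-length encodes L and then expands each run to max(1, min(count, k-1)) copies, replacing A's single pass with a membership scan (faster).

-- ===== PORT A =====
-- loop body of A's 'for i in range(len(L))' (state = (n, l)); L[i] and L[i-1] via pyGetD (indices always in Python range here)
def shortenAStep (L : List Int) (k : Int) (s : Int × List Int) (i : Int) : Int × List Int :=
  let x := PySem.List.pyGetD L i 0
  if x ∉ s.2 then (1, s.2 ++ [x])
  else if x = PySem.List.pyGetD L (i - 1) 0 then
    if s.1 + 1 ≥ k then (s.1 + 1, s.2) else (s.1 + 1, s.2 ++ [x])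
  else if x ≠ PySem.List.pyGetD L (i - 1) 0 then (1, s.2 ++ [x])
  else s

def shortenlongruns (L : List Int) (k : Int) : List Int :=
  ((PySem.List.pyRange 0 (L.length) 1).foldl (shortenAStep L k) (0, [])).2

-- ===== PORT B =====
-- stage 1 loop body: run-length encoding (runs[-1][1] += 1 ↦ replace the last pair)
def rleStep (runs : List (Int × Int)) (x : Int) : List (Int × Int) :=
  match runs.getLast? with
  | some r => if r.1 = x then runs.dropLast ++ [(r.1, r.2 + 1)] else runs ++ [(x, 1)]
  | none => runs ++ [(x, 1)]

def shortenlongruns_alt (L : List Int) (k : Int) : List Int :=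
  let runs := L.foldl rleStep []
  runs.foldl (fun out r => out ++ PySem.List.pyRepeat [r.1] (max 1 (min r.2 (k - 1)))) []

-- ===== PRECONDITION & SPEC =====
def Spec_shortenlongruns (L : List Int) (k : Int) (out : List Int) : Prop := out = shortenlongruns_alt L k
instance (L : List Int) (k : Int) (out : List Int) : Decidable (Spec_shortenlongruns L k out) := by unfold Spec_shortenlongruns; infer_instance

-- ===== CLAIM (what is proved, stated in full; the proofs are below) =====
def Claim_equal_shortenlongruns : Prop := ∀ (L : List Int) (k : Int), Dom_shortenlongruns L k → Spec_shortenlongruns L k (shortenlongruns L k)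

-- ===== LEMMAS AND PROOFS =====

-- proof-side one-pass loop (prev-element + counter); the bridge between A's loop and B's RLE
def shortenBStep (k : Int) (s : Int × Option Int × List Int) (x : Int) : Int × Option Int × List Int :=
  match s.2.1 with
  | some p =>
    if x = p then
      if s.1 + 1 < k then (s.1 + 1, some x, s.2.2 ++ [x]) else (s.1 + 1, some x, s.2.2)
    else (1, some x, s.2.2 ++ [x])
  | none => (1, some x, s.2.2 ++ [x])

-- expansion of a run list (flatMap form of B's second stage)
def expandRuns (k : Int) (runs : List (Int × Int)) : List Int :=
  runs.flatMap (fun r => List.replicate (max 1 (min r.2 (k - 1))).toNat r.1)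

-- A's loop = the one-pass loop (invariant over a pre/rest split of L)
lemma shorten_main (k : Int) (L : List Int) :
    ∀ (rest pre : List Int) (n : Int) (l : List Int),
      L = pre ++ rest →
      (pre = [] → l = []) →
      (∀ p, pre.getLast? = some p → p ∈ l) →
      ((PySem.List.pyRange (pre.length) (L.length) 1).foldl (shortenAStep L k) (n, l)).2
        = (rest.foldl (shortenBStep k) (n, pre.getLast?, l)).2.2 := by
  intro rest
  induction rest with
  | nil =>
    intro pre n l hL _ _
    have : (L.length : Int) ≤ (pre.length : Int) := by subst hL; simp
    rw [PySem.List.pyRange_one_eq_nil this]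
    simp
  | cons x rs ih =>
    intro pre n l hL h0 hlast
    have hlen : (pre.length : Int) < (L.length : Int) := by subst hL; simp
    rw [PySem.List.pyRange_one_cons hlen]
    simp only [List.foldl_cons]
    have hx : PySem.List.pyGetD L (pre.length) 0 = x := by
      rw [PySem.List.pyGetD_natCast]
      subst hL; simp [List.getD]
    have hcast : ((pre ++ [x]).length : Int) = (pre.length : Int) + 1 := by simp
    rcases List.eq_nil_or_concat' pre with hpre | ⟨ps, p0, hpre⟩
    · subst hpre
      have hl := h0 rfl; subst hl
      have hx0 : PySem.List.pyGetD L 0 0 = x := by simpa using hx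
      have h := ih [x] 1 [x] (by simpa using hL) (by simp) (by simp)
      simp only [shortenAStep, shortenBStep, hx0, List.getLast?_nil, List.not_mem_nil,
        not_false_iff, if_true, List.nil_append, List.length_nil, Nat.cast_zero, zero_add]
      simpa using h
    · have hp : pre.getLast? = some p0 := by subst hpre; simp
      have hpl : p0 ∈ l := hlast p0 hp
      have hprev : PySem.List.pyGetD L ((pre.length : Int) - 1) 0 = p0 := by
        have h1 : (1:Nat) ≤ pre.length := by subst hpre; simp
        have : ((pre.length : Int) - 1) = ((pre.length - 1 : Nat) : Int) := by omega
        rw [this, PySem.List.pyGetD_natCast]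
        subst hL
        have hlt : pre.length - 1 < pre.length := by omega
        rw [List.getD_eq_getElem?_getD, List.getElem?_append_left hlt]
        have hgl : pre.getLast? = pre[pre.length - 1]? := List.getLast?_eq_getElem?
        rw [hp] at hgl
        simp [← hgl]
      have step : ∀ (l' : List Int), x ∈ l' → (∀ n',
          ((PySem.List.pyRange ((pre.length : Int) + 1) (L.length) 1).foldl (shortenAStep L k) (n', l')).2
            = (rs.foldl (shortenBStep k) (n', some x, l')).2.2) := by
        intro l' hx' n'
        have h := ih (pre ++ [x]) n' l' (by simpa using hL) (by simp) (by intro q hq; simp only [List.getLast?_concat, Option.some.injEq] at hq; exact hq ▸ hx')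
        rw [hcast] at h
        simpa using h
      by_cases hmem : x ∈ l
      · by_cases hxp : x = p0
        · subst hxp
          simp only [shortenAStep, shortenBStep, hx, hprev, hp, hmem, not_true, if_false, if_true]
          by_cases hk : n + 1 ≥ k
          · rw [if_pos hk, if_neg (by omega)]
            exact step l hmem (n+1)
          · rw [if_neg hk, if_pos (by omega)]
            exact step (l ++ [x]) (by simp) (n+1)
        · simp only [shortenAStep, shortenBStep, hx, hprev, hp, hmem, hxp, not_true, if_false, ite_not]
          exact step (l ++ [x]) (by simp) 1
      · have hxp : x ≠ p0 := fun h => hmem (h ▸ hpl)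
        simp only [shortenAStep, shortenBStep, hx, hp, hmem, not_false_iff, if_true]
        rw [if_neg hxp]
        exact step (l ++ [x]) (by simp) 1

-- expansion of a run list distributes over concat
lemma expandRuns_concat (k : Int) (init : List (Int × Int)) (p m : Int) :
    expandRuns k (init ++ [(p, m)]) = expandRuns k init ++ List.replicate (max 1 (min m (k - 1))).toNat p := by
  simp [expandRuns]

-- bumping the last run's count appends one copy iff the run is still short
lemma expandRuns_bump (k : Int) (init : List (Int × Int)) (p n : Int) (hn : 1 ≤ n) :
    expandRuns k (init ++ [(p, n + 1)]) =
      expandRuns k (init ++ [(p, n)]) ++ (if n + 1 < k then [p] else []) := by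
  rw [expandRuns_concat, expandRuns_concat]
  by_cases h : n + 1 < k
  · have : (max 1 (min (n + 1) (k - 1))).toNat = (max 1 (min n (k - 1))).toNat + 1 := by omega
    rw [this, List.replicate_succ']
    simp [h]
  · have : (max 1 (min (n + 1) (k - 1))).toNat = (max 1 (min n (k - 1))).toNat := by omega
    rw [this]
    simp [h]

-- the one-pass loop = RLE + expansion (invariant: out already equals the expansion so far)
lemma rle_main (k : Int) :
    ∀ (rest : List Int) (init : List (Int × Int)) (p n : Int), 1 ≤ n →
      (rest.foldl (shortenBStep k) (n, some p, expandRuns k (init ++ [(p, n)]))).2.2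
        = expandRuns k (rest.foldl rleStep (init ++ [(p, n)])) := by
  intro rest
  induction rest with
  | nil => intro init p n _; simp
  | cons x rs ih =>
    intro init p n hn
    simp only [List.foldl_cons]
    have hlast : rleStep (init ++ [(p, n)]) x =
        if p = x then init ++ [(p, n + 1)] else (init ++ [(p, n)]) ++ [(x, 1)] := by
      simp [rleStep]
    by_cases hxp : x = p
    · subst hxp
      rw [hlast, if_pos rfl]
      simp only [shortenBStep, if_true]
      by_cases hk : n + 1 < k
      · rw [if_pos hk]
        have := expandRuns_bump k init x n hn
        rw [if_pos hk] at this
        rw [← this]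
        exact ih init x (n + 1) (by omega)
      · rw [if_neg hk]
        have := expandRuns_bump k init x n hn
        rw [if_neg hk] at this
        simp only [List.append_nil] at this
        rw [← this]
        exact ih init x (n + 1) (by omega)
    · rw [hlast, if_neg (fun h => hxp h.symm)]
      simp only [shortenBStep]
      rw [if_neg hxp]
      have hone : expandRuns k ((init ++ [(p, n)]) ++ [(x, 1)])
          = expandRuns k (init ++ [(p, n)]) ++ [x] := by
        rw [expandRuns_concat]
        have : (max 1 (min (1:Int) (k - 1))).toNat = 1 := by omega
        rw [this]; simp
      rw [← hone]
      exact ih (init ++ [(p, n)]) x 1 le_rfl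

-- B's second-stage fold is the flatMap expansion
lemma alt_eq_expand (L : List Int) (k : Int) :
    shortenlongruns_alt L k = expandRuns k (L.foldl rleStep []) := by
  unfold shortenlongruns_alt expandRuns
  rw [PySem.List.foldl_append_eq_flatMap]
  simp [PySem.List.pyRepeat_singleton]

-- ===== VERDICT (by name: the statement is the Claim_ definition above) =====
theorem shortenlongruns_spec : Claim_equal_shortenlongruns := by
  intro L k _
  unfold Spec_shortenlongruns
  rw [alt_eq_expand]
  have hA : shortenlongruns L k = (L.foldl (shortenBStep k) (0, none, [])).2.2 := by
    unfold shortenlongruns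
    have h := shorten_main k L L [] 0 [] (by simp) (by simp) (by simp)
    simpa using h
  rw [hA]
  cases L with
  | nil => simp [expandRuns]
  | cons x rs =>
    simp only [List.foldl_cons, shortenBStep]
    have h1 : rleStep [] x = [(x, 1)] := by simp [rleStep]
    rw [h1]
    have hexp : expandRuns k ([] ++ [(x, 1)]) = [x] := by
      rw [expandRuns_concat]
      have : (max 1 (min (1:Int) (k - 1))).toNat = 1 := by omega
      rw [this]; simp [expandRuns]
    have h := rle_main k rs [] x 1 le_rfl
    rw [hexp] at h
    simpa using h
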